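-- pv_equiv track=rewrite | github.com/penciler-star/EthoClaw | skills/ethoclaw-normalize-tabular/scripts/normalize_data.py | dedupe_names
-- ===== SOURCE A (Python) =====
-- def dedupe_names(names: list[str]) -> list[str]:
--     seen: dict[str, int] = {}
--     output: list[str] = []
--
--     for name in names:
--         count = seen.get(name, 0)
--         seen[name] = count + 1
--         output.append(name if count == 0 else f"{name}_{count + 1}")
--
--     return output
-- ===== SOURCE B (Python) =====
-- def dedupe_names(names: list[str]) -> list[str]:
--     # Group-then-scatter: build an index of each name's occurrence positions,
--     # then write the suffixed variants back into a preallocated output by position.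
--     positions: dict[str, list[int]] = {}
--     for i, name in enumerate(names):
--         positions.setdefault(name, []).append(i)
--     out = [None] * len(names)
--     for name, idxs in positions.items():
--         for k, idx in enumerate(idxs):
--             out[idx] = name if k == 0 else f"{name}_{k + 1}"
--     return out
-- ===== Notes on version B (the rewrite author's own statement) =====
-- stated objective: alternative
-- what changed: Replaced A's single streaming pass with a running-count dict by a two-stage group-then-scatter algorithm: first build an index mapping each name to the list of its occurrence positions, then fill a preallocated output array by writing each occurrence's suffixed variant at its stored position.
import Mathlib
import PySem

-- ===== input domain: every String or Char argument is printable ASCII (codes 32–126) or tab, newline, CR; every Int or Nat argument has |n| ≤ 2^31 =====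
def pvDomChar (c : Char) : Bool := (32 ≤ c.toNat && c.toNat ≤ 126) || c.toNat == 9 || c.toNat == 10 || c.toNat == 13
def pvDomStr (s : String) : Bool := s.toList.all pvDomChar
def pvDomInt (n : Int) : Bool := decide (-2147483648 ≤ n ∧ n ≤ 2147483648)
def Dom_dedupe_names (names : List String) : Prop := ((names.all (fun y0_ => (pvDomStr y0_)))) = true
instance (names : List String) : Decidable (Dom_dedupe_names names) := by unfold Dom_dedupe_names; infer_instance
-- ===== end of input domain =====

-- B replaces A's streaming running-count pass by a group-then-scatter algorithm (positions index, then writes by stored position); alternative decomposition, same values.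


-- ===== PORT A =====
def dedupe_names (names : List String) : List String :=
  (names.foldl (fun (st : PySem.Dict String Int × List String) name =>
      let count := st.1.getD name 0
      (st.1.insert name (count + 1),
       st.2 ++ [if count == 0 then name else name ++ "_" ++ PySem.Int.toStr (count + 1)]))
    ((PySem.Dict.empty : PySem.Dict String Int), ([] : List String))).2

-- ===== PORT B =====
-- B: positions = {name: [occurrence indices]} built once; out = [None]*n; each group's
-- k-th occurrence writes name / name_{k+1} at its stored index; the final `.getD ""` only
-- totalises the Option cells (every cell is written, as proved below).
def dedupe_names_alt (names : List String) : List String :=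
  let positions := (PySem.List.enumerate names).foldl
      (fun (d : PySem.Dict String (List Int)) p => d.modify p.2 [] (· ++ [p.1]))
      (PySem.Dict.empty : PySem.Dict String (List Int))
  let out0 : List (Option String) := List.replicate names.length none
  let out := positions.items.foldl (fun out q =>
      (PySem.List.enumerate q.2).foldl (fun out r =>
          PySem.List.pySetD out r.2
            (some (if r.1 == 0 then q.1 else q.1 ++ "_" ++ PySem.Int.toStr (r.1 + 1)))) out)
    out0
  out.map (fun o => o.getD "")

-- ===== PRECONDITION & SPEC =====
def Spec_dedupe_names (names : List String) (out : List String) : Prop := out = dedupe_names_alt names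
instance (names : List String) (out : List String) : Decidable (Spec_dedupe_names names out) := by unfold Spec_dedupe_names; infer_instance

-- ===== CLAIM (what is proved, stated in full; the proofs are below) =====
def Claim_equal_dedupe_names : Prop := ∀ (names : List String), Dom_dedupe_names names → Spec_dedupe_names names (dedupe_names names)

-- ===== LEMMAS AND PROOFS =====

-- canonical middle form: the j-th output is names[j] tagged with its prefix count
def pvTag (v : String) (k : Nat) : String :=
  if k = 0 then v else v ++ "_" ++ PySem.Int.toStr ((k : Int) + 1)

def pvF (names : List String) (j : Nat) : String :=
  pvTag (names.getD j "") ((names.take j).count (names.getD j ""))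

def pvC (names : List String) : List String := (List.range names.length).map (pvF names)

-- occurrence positions of v in xs, in order
def pvOcc (xs : List String) (v : String) : List Nat :=
  match xs with
  | [] => []
  | x :: t => (if x = v then [0] else []) ++ (pvOcc t v).map (· + 1)

-- ---------- A = pvC ----------

def pvSeen (pre : List String) : PySem.Dict String Int :=
  pre.foldl (fun d x => d.insert x (d.getD x 0 + 1)) PySem.Dict.empty

lemma pvSeen_getD (pre : List String) (v : String) :
    (pvSeen pre).getD v 0 = pre.count v := by
  simpa using PySem.Dict.getD_foldl_insert_add_one (l := pre) (d := PySem.Dict.empty) (v := v)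

lemma pvSeen_snoc (pre : List String) (n : String) :
    pvSeen (pre ++ [n]) = (pvSeen pre).insert n ((pvSeen pre).getD n 0 + 1) := by
  simp [pvSeen, List.foldl_append]

lemma pvTag_cast (v : String) (k : Nat) :
    (if (k : Int) == 0 then v else v ++ "_" ++ PySem.Int.toStr ((k : Int) + 1)) = pvTag v k := by
  by_cases h : k = 0 <;> simp [pvTag, h]

lemma dedupe_key (l : List String) : ∀ (pre acc : List String),
    (l.foldl (fun (st : PySem.Dict String Int × List String) name =>
        let count := st.1.getD name 0
        (st.1.insert name (count + 1),
         st.2 ++ [if count == 0 then name else name ++ "_" ++ PySem.Int.toStr (count + 1)]))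
      (pvSeen pre, acc)).2
    = acc ++ (List.range l.length).map (fun j => pvF (pre ++ l) (pre.length + j)) := by
  induction l with
  | nil => intro pre acc; simp
  | cons n l ih =>
    intro pre acc
    have hstep : (pvSeen pre).insert n ((pvSeen pre).getD n 0 + 1) = pvSeen (pre ++ [n]) :=
      (pvSeen_snoc pre n).symm
    have hcnt : (pvSeen pre).getD n 0 = (pre.count n : Int) := pvSeen_getD pre n
    have hhead : (if ((pre.count n : Int)) == 0 then n
        else n ++ "_" ++ PySem.Int.toStr ((pre.count n : Int) + 1)) = pvF (pre ++ n :: l) pre.length := by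
      rw [pvTag_cast]
      have h2 : (pre ++ n :: l).take pre.length = pre := by
        simp
      simp [pvF, h2]
    calc
      (List.foldl _ (pvSeen pre, acc) (n :: l)).2
          = (l.foldl (fun (st : PySem.Dict String Int × List String) name =>
              let count := st.1.getD name 0
              (st.1.insert name (count + 1),
               st.2 ++ [if count == 0 then name else name ++ "_" ++ PySem.Int.toStr (count + 1)]))
            (pvSeen (pre ++ [n]),
             acc ++ [if ((pre.count n : Int)) == 0 then n
                     else n ++ "_" ++ PySem.Int.toStr ((pre.count n : Int) + 1)])).2 := by
            simp only [List.foldl_cons]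
            rw [hstep, hcnt]
      _ = acc ++ [if ((pre.count n : Int)) == 0 then n
                  else n ++ "_" ++ PySem.Int.toStr ((pre.count n : Int) + 1)]
            ++ (List.range l.length).map (fun j => pvF ((pre ++ [n]) ++ l) ((pre ++ [n]).length + j)) := by
            rw [ih]
      _ = _ := by
            rw [hhead]
            simp only [List.append_assoc, List.singleton_append, List.length_append,
              List.length_cons, List.length_nil]
            rw [List.range_succ_eq_map]
            simp [List.map_map, Function.comp, Nat.add_comm, Nat.add_left_comm]

lemma A_eq_pvC (names : List String) : dedupe_names names = pvC names := by
  unfold dedupe_names pvC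
  have h := dedupe_key names [] []
  simpa [pvSeen] using h

-- ---------- pvOcc facts ----------

lemma pvOcc_spec (xs : List String) (v : String) :
    ∀ k i, (pvOcc xs v)[k]? = some i →
      i < xs.length ∧ xs.getD i "" = v ∧ (xs.take i).count v = k := by
  induction xs with
  | nil => intro k i h; simp [pvOcc] at h
  | cons x t ih =>
    intro k i h
    by_cases hx : x = v
    · simp [pvOcc, hx] at h
      match k with
      | 0 =>
        simp at h
        subst h
        simp [hx]
      | k + 1 =>
        simp [List.getElem?_map] at h
        obtain ⟨j, hj, hij⟩ := h
        obtain ⟨h1, h2, h3⟩ := ih k j hj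
        subst hij
        refine ⟨by simp only [List.length_cons]; omega, by simpa using h2, ?_⟩
        simp [h3, hx]
    · simp [pvOcc, hx, List.getElem?_map] at h
      obtain ⟨j, hj, hij⟩ := h
      obtain ⟨h1, h2, h3⟩ := ih k j hj
      subst hij
      refine ⟨by simp only [List.length_cons]; omega, by simpa using h2, ?_⟩
      simp [h3, hx]

lemma pvOcc_mem (xs : List String) (v : String) :
    ∀ i, i < xs.length → xs.getD i "" = v → i ∈ pvOcc xs v := by
  induction xs with
  | nil => intro i h; simp at h
  | cons x t ih =>
    intro i hi hv
    match i with
    | 0 =>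
      simp at hv
      simp [pvOcc, hv]
    | i + 1 =>
      have ht : i ∈ pvOcc t v := ih i (by simpa using hi) (by simpa using hv)
      have hmap : i + 1 ∈ (pvOcc t v).map (· + 1) := List.mem_map.mpr ⟨i, ht, rfl⟩
      simp only [pvOcc]
      exact List.mem_append_right _ hmap

-- ---------- the positions dict ----------

def pvPos (names : List String) : PySem.Dict String (List Int) :=
  (PySem.List.enumerate names).foldl
    (fun (d : PySem.Dict String (List Int)) p => d.modify p.2 [] (· ++ [p.1]))
    PySem.Dict.empty

lemma pvEnum_filter (names : List String) (v : String) : ∀ (s : Int),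
    ((((PySem.List.enumerate names s).map Prod.swap).filter (fun p => p.1 == v)).map (·.2))
      = (pvOcc names v).map (fun (j : Nat) => s + (j : Int)) := by
  induction names with
  | nil => intro s; simp [pvOcc]
  | cons x t ih =>
    intro s
    have hcomp : ∀ occ : List Nat, occ.map (fun (j : Nat) => (s + 1) + (j : Int))
        = occ.map ((fun (j : Nat) => s + (j : Int)) ∘ (fun j => j + 1)) :=
      fun occ => List.map_congr_left (fun a _ => by simp only [Function.comp_apply]; push_cast; ring)
    have hstep : (((PySem.List.enumerate (x :: t) s).map Prod.swap).filter (fun p => p.1 == v))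
        = (if x = v then [(x, s)] else [])
          ++ (((PySem.List.enumerate t (s + 1)).map Prod.swap).filter (fun p => p.1 == v)) := by
      rw [PySem.List.enumerate_cons]
      by_cases hx : x = v <;> simp [hx]
    rw [hstep, List.map_append, ih (s + 1), hcomp]
    simp only [pvOcc, List.map_append, List.map_map]
    by_cases hx : x = v <;> simp [hx]

lemma pvPos_getD (names : List String) (v : String) :
    (pvPos names).getD v [] = (pvOcc names v).map (fun (j : Nat) => (j : Int)) := by
  have hswap : pvPos names
      = ((PySem.List.enumerate names).map Prod.swap).foldl
      (fun (d : PySem.Dict String (List Int)) p => d.modify p.1 [] (· ++ [p.2]))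
      PySem.Dict.empty := by
    unfold pvPos
    rw [List.foldl_map]
    rfl
  rw [hswap, PySem.Dict.getD_foldl_modify_append]
  have h := pvEnum_filter names v 0
  simpa using h

lemma pvPos_nodup_keys (names : List String) : (pvPos names).keys.Nodup := by
  unfold pvPos
  exact PySem.Dict.nodup_keys_foldl_modify_key (β := Int × String)
    (PySem.List.enumerate names) (fun p => p.2) [] (fun _ p l => l ++ [p.1]) PySem.Dict.empty
    (by simp [PySem.Dict.keys_empty])

lemma pvPos_keys (names : List String) : (pvPos names).keys = PySem.Set.ofList names := by
  have h := PySem.Dict.keys_foldl_modify_key (β := Int × String)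
    (PySem.List.enumerate names) (fun p => p.2) ([] : List Int) (fun _ p l => l ++ [p.1])
    PySem.Dict.empty
  simp only [PySem.List.map_snd_enumerate, PySem.Dict.keys_empty,
    PySem.Set.update_nil_left] at h
  exact h

-- ---------- enumerate membership ----------

lemma mem_enumerate (xs : List Int) : ∀ (s : Int) (r : Int × Int), r ∈ PySem.List.enumerate xs s →
    ∃ k : Nat, r.1 = s + (k : Int) ∧ xs[k]? = some r.2 := by
  induction xs with
  | nil => intro s r h; simp [PySem.List.enumerate] at h
  | cons x t ih =>
    intro s r h
    rw [PySem.List.enumerate_cons] at h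
    rcases List.mem_cons.mp h with h | h
    · exact ⟨0, by simp [h], by simp [h]⟩
    · obtain ⟨k, h1, h2⟩ := ih (s + 1) r h
      exact ⟨k + 1, by push_cast; omega, by simpa using h2⟩

-- ---------- the scatter loop ----------

def pvScat (ws : List (Int × Option String)) (out0 : List (Option String)) : List (Option String) :=
  ws.foldl (fun out r => PySem.List.pySetD out r.1 r.2) out0

lemma pvScat_length (ws : List (Int × Option String)) : ∀ out0,
    (pvScat ws out0).length = out0.length := by
  induction ws with
  | nil => intro out0; simp [pvScat]
  | cons w t ih =>
    intro out0
    simp only [pvScat, List.foldl_cons]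
    rw [show (List.foldl (fun out r => PySem.List.pySetD out r.1 r.2)
        (PySem.List.pySetD out0 w.1 w.2) t) = pvScat t (PySem.List.pySetD out0 w.1 w.2) from rfl,
      ih, PySem.List.length_pySetD]

lemma pvScat_getElem? (f : Nat → String) (ws : List (Int × Option String)) : ∀ out0,
    (∀ p ∈ ws, ∃ jn : Nat, p.1 = (jn : Int) ∧ jn < out0.length ∧ p.2 = some (f jn)) →
    ∀ j : Nat,
      (pvScat ws out0)[j]? = if ((j : Int)) ∈ ws.map (·.1) then some (some (f j)) else out0[j]? := by
  induction ws with
  | nil => intro out0 _ j; simp [pvScat]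
  | cons w t ih =>
    intro out0 H j
    obtain ⟨jn, hj1, hj2, hj3⟩ := H w (List.mem_cons_self)
    have hstep : pvScat (w :: t) out0 = pvScat t (out0.set jn w.2) := by
      simp only [pvScat, List.foldl_cons]
      rw [hj1, PySem.List.pySetD_natCast]
    rw [hstep, ih (out0.set jn w.2)
      (by intro p hp; obtain ⟨kn, h1, h2, h3⟩ := H p (List.mem_cons_of_mem _ hp)
          exact ⟨kn, h1, by simpa using h2, h3⟩) j]
    by_cases hmem : ((j : Int)) ∈ t.map (·.1)
    · simp [hmem]
    · by_cases hjw : j = jn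
      · subst hjw
        simp [hmem, hj1, hj3, hj2]
      · have hne : ((j : Int)) ≠ w.1 := by
          rw [hj1]; exact_mod_cast fun h => hjw (by exact_mod_cast h)
        simp [hmem, hne, List.getElem?_set]
        intro h; omega

-- the full write list of B's nested loop
def pvWrites (names : List String) : List (Int × Option String) :=
  (pvPos names).items.flatMap (fun q =>
    (PySem.List.enumerate q.2).map (fun r =>
      (r.2, some (if r.1 == 0 then q.1 else q.1 ++ "_" ++ PySem.Int.toStr (r.1 + 1)))))

lemma pvNested_eq_scat (names : List String) (out0 : List (Option String)) :
    (pvPos names).items.foldl (fun out q =>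
        (PySem.List.enumerate q.2).foldl (fun out r =>
            PySem.List.pySetD out r.2
              (some (if r.1 == 0 then q.1 else q.1 ++ "_" ++ PySem.Int.toStr (r.1 + 1)))) out)
      out0 = pvScat (pvWrites names) out0 := by
  unfold pvWrites pvScat
  rw [List.foldl_flatMap]
  congr 1
  funext out q
  rw [List.foldl_map]

lemma pvWrites_sound (names : List String) :
    ∀ p ∈ pvWrites names, ∃ jn : Nat, p.1 = (jn : Int) ∧ jn < names.length ∧ p.2 = some (pvF names jn) := by
  intro p hp
  unfold pvWrites at hp
  rw [List.mem_flatMap] at hp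
  obtain ⟨q, hq, hp⟩ := hp
  rw [List.mem_map] at hp
  obtain ⟨r, hr, hpr⟩ := hp
  have hq' : (q.1, q.2) ∈ (pvPos names).items := by simpa using hq
  have hgetD : (pvPos names).getD q.1 [] = q.2 :=
    PySem.Dict.getD_of_mem_items (pvPos names) hq' (pvPos_nodup_keys names) []
  have hq2 : q.2 = (pvOcc names q.1).map (fun (j : Nat) => (j : Int)) := by
    rw [← hgetD, pvPos_getD]
  obtain ⟨k, hk1, hk2⟩ := mem_enumerate q.2 0 r hr
  rw [hq2, List.getElem?_map] at hk2
  simp only [Option.map_eq_some_iff] at hk2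
  obtain ⟨i, hi, hir⟩ := hk2
  obtain ⟨h1, h2, h3⟩ := pvOcc_spec names q.1 k i hi
  refine ⟨i, by rw [← hpr]; simpa using hir.symm, h1, ?_⟩
  rw [← hpr]
  simp only [zero_add] at hk1
  simp only [hk1]
  rw [pvTag_cast]
  have hF : pvF names i = pvTag q.1 k := by
    unfold pvF
    rw [h2, h3]
  rw [hF]

lemma pvWrites_complete (names : List String) :
    ∀ j : Nat, j < names.length → ((j : Int)) ∈ (pvWrites names).map (·.1) := by
  intro j hj
  set v := names.getD j "" with hv
  have hmemv : v ∈ names := by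
    rw [hv, List.getD_eq_getElem?_getD, List.getElem?_eq_getElem hj]
    simp
  have hkeys : v ∈ (pvPos names).keys := by
    rw [pvPos_keys]
    exact (PySem.Set.mem_ofList _ _).mpr hmemv
  rw [show (pvPos names).keys = (pvPos names).items.map (fun p => p.1) from rfl] at hkeys
  obtain ⟨q, hq, hq1⟩ := List.mem_map.mp hkeys
  have hq' : (q.1, q.2) ∈ (pvPos names).items := by
    obtain ⟨a, b⟩ := q; exact hq
  have hgetD : (pvPos names).getD q.1 [] = q.2 :=
    PySem.Dict.getD_of_mem_items (pvPos names) hq' (pvPos_nodup_keys names) []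
  rw [List.mem_map]
  rw [pvWrites]
  have hjOcc : j ∈ pvOcc names q.1 := pvOcc_mem names q.1 j hj (by rw [hq1])
  have hjq2 : ((j : Int)) ∈ q.2 := by
    rw [← hgetD, pvPos_getD]
    exact List.mem_map.mpr ⟨j, hjOcc, rfl⟩
  have : ((j : Int)) ∈ (PySem.List.enumerate q.2).map (·.2) := by
    rw [PySem.List.map_snd_enumerate]; exact hjq2
  obtain ⟨r, hr, hr2⟩ := List.mem_map.mp this
  refine ⟨(r.2, some (if r.1 == 0 then q.1 else q.1 ++ "_" ++ PySem.Int.toStr (r.1 + 1))), ?_, by simpa using hr2⟩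
  rw [List.mem_flatMap]
  exact ⟨q, hq, List.mem_map.mpr ⟨r, hr, rfl⟩⟩

lemma B_eq_pvC (names : List String) : dedupe_names_alt names = pvC names := by
  have hB : dedupe_names_alt names =
      ((pvPos names).items.foldl (fun out q =>
          (PySem.List.enumerate q.2).foldl (fun out r =>
              PySem.List.pySetD out r.2
                (some (if r.1 == 0 then q.1 else q.1 ++ "_" ++ PySem.Int.toStr (r.1 + 1)))) out)
        (List.replicate names.length (none : Option String))).map (fun o => o.getD "") := rfl
  rw [hB, pvNested_eq_scat]
  have hpt := pvScat_getElem? (pvF names) (pvWrites names) (List.replicate names.length none)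
    (by intro p hp
        obtain ⟨jn, h1, h2, h3⟩ := pvWrites_sound names p hp
        exact ⟨jn, h1, by simpa using h2, h3⟩)
  apply List.ext_getElem?
  intro j
  by_cases hj : j < names.length
  · rw [List.getElem?_map, hpt j, if_pos (pvWrites_complete names j hj)]
    simp [pvC, List.getElem?_map, List.getElem?_range hj]
  · rw [List.getElem?_eq_none
          (by simp only [List.length_map, pvScat_length, List.length_replicate]; omega),
        List.getElem?_eq_none
          (by simp only [pvC, List.length_map, List.length_range]; omega)]

-- ===== VERDICT (by name: the statement is the Claim_ definition above) =====
theorem dedupe_names_spec : Claim_equal_dedupe_names := by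
  intro names _
  unfold Spec_dedupe_names
  rw [A_eq_pvC, B_eq_pvC]
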